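-- pv_equiv track=rewrite | github.com/zanqi/ReCOGS | utils/train_utils.py | check_equal
-- ===== SOURCE A (Python) =====
-- def check_equal(left_lf, right_lf):
--     index_mapping = {}
--     current_idx = 0
--     for t in left_lf.split():
--         if t.isnumeric():
--             if int(t) not in index_mapping:
--                 index_mapping[int(t)] = current_idx
--                 current_idx += 1
--     decoded_labels_ii = []
--     for t in left_lf.split():
--         if t.isnumeric():
--             decoded_labels_ii += [str(index_mapping[int(t)])]
--         else:
--             decoded_labels_ii += [t]
--
--     index_mapping = {}
--     current_idx = 0
--     for t in right_lf.split():
--         if t.isnumeric():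
--             if int(t) not in index_mapping:
--                 index_mapping[int(t)] = current_idx
--                 current_idx += 1
--     decoded_preds_ii = []
--     for t in right_lf.split():
--         if t.isnumeric():
--             decoded_preds_ii += [str(index_mapping[int(t)])]
--         else:
--             decoded_preds_ii += [t]
--
--     decoded_labels_ii_str = " ".join(decoded_labels_ii)
--     decoded_preds_ii_str = " ".join(decoded_preds_ii)
--
--     if decoded_preds_ii_str == decoded_labels_ii_str:
--         return True
--     return False
-- ===== SOURCE B (Python) =====
-- def check_equal(left_lf, right_lf):
--     lt = left_lf.split()
--     rt = right_lf.split()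
--     if len(lt) != len(rt):
--         return False
--     l2r = {}
--     r2l = {}
--     for a, b in zip(lt, rt):
--         if a.isnumeric() and b.isnumeric():
--             i, j = int(a), int(b)
--             if l2r.get(i, j) != j or r2l.get(j, i) != i:
--                 return False
--             l2r[i] = j
--             r2l[j] = i
--         elif a.isnumeric() or b.isnumeric():
--             return False
--         elif a != b:
--             return False
--     return True
-- ===== Notes on version B (the rewrite author's own statement) =====
-- stated objective: alternative
-- what changed: Instead of building a canonical renumbering of each logical form as a joined string and comparing the two strings, B splits both forms once and walks the token pairs in a single zip pass, maintaining a two-way int-keyed map (l2r/r2l) that checks the variable indices form a consistent bijection and that non-numeric tokens match exactly.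
import Mathlib
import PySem

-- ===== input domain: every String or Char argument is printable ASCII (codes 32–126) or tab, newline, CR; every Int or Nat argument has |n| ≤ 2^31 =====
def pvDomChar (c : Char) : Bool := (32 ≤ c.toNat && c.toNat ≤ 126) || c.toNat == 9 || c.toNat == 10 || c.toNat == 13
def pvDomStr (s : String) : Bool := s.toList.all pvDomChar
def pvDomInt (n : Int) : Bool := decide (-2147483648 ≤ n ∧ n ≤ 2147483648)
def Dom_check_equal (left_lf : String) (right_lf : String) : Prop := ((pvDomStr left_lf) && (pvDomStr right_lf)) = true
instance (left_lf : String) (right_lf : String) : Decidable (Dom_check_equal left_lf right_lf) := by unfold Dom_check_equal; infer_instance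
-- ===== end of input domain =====

-- B replaces A's build-canonical-strings-and-compare by a single zipped pass keeping a
-- two-way index bijection (objective: alternative decomposition, same asymptotic cost).

-- ===== PORT A =====
-- int(t): A only applies it to tokens that passed isnumeric(), where ofChars? is exact
def pvToInt (t : List Char) : Int := (PySem.Int.ofChars? t).getD 0

-- first loop of each half: index_mapping/current_idx accumulation
def pvBuildA (toks : List (List Char)) : PySem.Dict Int Int × Int :=
  toks.foldl (fun st t =>
    if PySem.Chars.strIsdigit t then
      if st.1.contains (pvToInt t) then st
      else (st.1.insert (pvToInt t) st.2, st.2 + 1)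
    else st) (PySem.Dict.empty, 0)

-- second loop of each half: decoded_… list accumulation
def pvCanonA (toks : List (List Char)) (d : PySem.Dict Int Int) : List (List Char) :=
  toks.foldl (fun acc t =>
    if PySem.Chars.strIsdigit t then acc ++ [PySem.Int.toChars (d.getD (pvToInt t) 0)]
    else acc ++ [t]) []

-- t.isnumeric() is ported as strIsdigit: exact on the ASCII domain Dom, where isnumeric = isdigit
def check_equal (left_lf : String) (right_lf : String) : Bool :=
  let ltoks := PySem.Chars.split₀ left_lf.toList
  let labels := pvCanonA ltoks (pvBuildA ltoks).1
  let rtoks := PySem.Chars.split₀ right_lf.toList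
  let preds := pvCanonA rtoks (pvBuildA rtoks).1
  if PySem.Chars.join [' '] preds = PySem.Chars.join [' '] labels then true else false

-- ===== PORT B =====
-- the zipped pass of Source B, carrying the two direction maps l2r / r2l
def pvGoB : List (List Char × List Char) → PySem.Dict Int Int → PySem.Dict Int Int → Bool
  | [], _, _ => true
  | (a, b) :: rest, l2r, r2l =>
    if PySem.Chars.strIsdigit a && PySem.Chars.strIsdigit b then
      if l2r.getD (pvToInt a) (pvToInt b) = pvToInt b ∧ r2l.getD (pvToInt b) (pvToInt a) = pvToInt a then
        pvGoB rest (l2r.insert (pvToInt a) (pvToInt b)) (r2l.insert (pvToInt b) (pvToInt a))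
      else false
    else if PySem.Chars.strIsdigit a || PySem.Chars.strIsdigit b then false
    else if a = b then pvGoB rest l2r r2l else false

def check_equal_alt (left_lf : String) (right_lf : String) : Bool :=
  let lt := PySem.Chars.split₀ left_lf.toList
  let rt := PySem.Chars.split₀ right_lf.toList
  if lt.length ≠ rt.length then false
  else pvGoB (lt.zip rt) PySem.Dict.empty PySem.Dict.empty

-- ===== PRECONDITION & SPEC =====
def Spec_check_equal (left_lf : String) (right_lf : String) (out : Bool) : Prop := out = check_equal_alt left_lf right_lf
instance (left_lf : String) (right_lf : String) (out : Bool) : Decidable (Spec_check_equal left_lf right_lf out) := by unfold Spec_check_equal; infer_instance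

-- ===== CLAIM (what is proved, stated in full; the proofs are below) =====
def Claim_equal_check_equal : Prop := ∀ (left_lf : String) (right_lf : String), Dom_check_equal left_lf right_lf → Spec_check_equal left_lf right_lf (check_equal left_lf right_lf)

-- ===== LEMMAS AND PROOFS =====

-- the numeric values of the tokens, in order
def pvNums (toks : List (List Char)) : List Int :=
  toks.filterMap (fun t => if PySem.Chars.strIsdigit t then some (pvToInt t) else none)

-- first-occurrence rank of a value
def pvRank (v : Int) (xs : List Int) : Int := ((PySem.List.dedup xs).idxOf v : Int)

-- what A's canonicalisation of a token list amounts to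
def pvCanonSpec (toks : List (List Char)) : List (List Char) :=
  toks.map (fun t => if PySem.Chars.strIsdigit t then PySem.Int.toChars (pvRank (pvToInt t) (pvNums toks)) else t)

def pvRankDict (d : PySem.Dict Int Int) : Prop :=
  ∀ v, d.get? v = if v ∈ d.keys then some ((d.keys.idxOf v : Nat) : Int) else none

def pvShape (q : List (List Char × List Char)) : Prop :=
  ∀ p ∈ q, PySem.Chars.strIsdigit p.1 = PySem.Chars.strIsdigit p.2 ∧
    (PySem.Chars.strIsdigit p.1 = false → p.1 = p.2)

def pvPairs (q : List (List Char × List Char)) : List (Int × Int) :=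
  q.filterMap (fun p => if PySem.Chars.strIsdigit p.1 && PySem.Chars.strIsdigit p.2 then some (pvToInt p.1, pvToInt p.2) else none)

def pvPattern (P : List (Int × Int)) : Prop := ∀ a ∈ P, ∀ b ∈ P, (a.1 = b.1 ↔ a.2 = b.2)

def pvCompat (l2r r2l : PySem.Dict Int Int) (P : List (Int × Int)) : Prop :=
  ∀ a ∈ P, (∀ j, l2r.get? a.1 = some j → j = a.2) ∧ (∀ i, r2l.get? a.2 = some i → i = a.1)

-- tokens produced by split() are nonempty and whitespace-free
theorem pv_split₀_go_tokens (s : List Char) : ∀ (cur : List Char) (acc : List (List Char)),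
    (∀ c ∈ cur, PySem.Chars.isspace c = false) →
    (∀ t ∈ acc, t ≠ [] ∧ ∀ c ∈ t, PySem.Chars.isspace c = false) →
    ∀ t ∈ PySem.Chars.split₀.go s cur acc, t ≠ [] ∧ ∀ c ∈ t, PySem.Chars.isspace c = false := by
  induction s with
  | nil =>
    intro cur acc hcur hacc t ht
    simp only [PySem.Chars.split₀.go] at ht
    split at ht
    · exact hacc t (List.mem_reverse.mp ht)
    · rcases List.mem_cons.mp (List.mem_reverse.mp ht) with h | h
      · next hne =>
        subst h
        refine ⟨by simpa using fun h => hne (by simp [h]), ?_⟩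
        intro c hc; exact hcur c (List.mem_reverse.mp hc)
      · exact hacc t h
  | cons c rest ih =>
    intro cur acc hcur hacc t ht
    simp only [PySem.Chars.split₀.go] at ht
    split at ht
    · split at ht
      · exact ih [] acc (by simp) hacc t ht
      · next hne =>
        refine ih [] _ (by simp) ?_ t ht
        intro u hu
        rcases List.mem_cons.mp hu with h | h
        · subst h
          refine ⟨by simpa using fun h => hne (by simp [h]), ?_⟩
          intro x hx; exact hcur x (List.mem_reverse.mp hx)
        · exact hacc u h
    · next hsp =>
      refine ih (c :: cur) acc ?_ hacc t ht
      intro x hx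
      rcases List.mem_cons.mp hx with h | h
      · subst h; simpa using hsp
      · exact hcur x h

theorem pv_split₀_tokens (s : List Char) :
    ∀ t ∈ PySem.Chars.split₀ s, t ≠ [] ∧ ∀ c ∈ t, PySem.Chars.isspace c = false :=
  pv_split₀_go_tokens s [] [] (by simp) (by simp)

-- decimal digit strings: nonempty, digits only, injective
theorem pv_digitChar_inj (a b : Nat) (ha : a < 10) (hb : b < 10) (h : Nat.digitChar a = Nat.digitChar b) : a = b := by
  interval_cases a <;> interval_cases b <;> simp_all [Nat.digitChar]

theorem pv_toDigits_inj (a : Nat) : ∀ b : Nat, Nat.toDigits 10 a = Nat.toDigits 10 b → a = b := by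
  induction a using Nat.strong_induction_on with
  | _ a ih =>
    intro b h
    rw [Nat.toDigits_eq_if (by norm_num)] at h
    conv at h => rw [Nat.toDigits_eq_if (n := b) (by norm_num)]
    split at h <;> split at h
    · next ha hb =>
      exact pv_digitChar_inj a b ha hb (by simpa using h)
    · next ha hb =>
      exfalso
      have hlen := congrArg List.length h
      have := @Nat.length_toDigits_pos 10 (b / 10)
      simp only [List.length_append, List.length_cons, List.length_nil] at hlen
      omega
    · next ha hb =>
      exfalso
      have hlen := congrArg List.length h
      have := @Nat.length_toDigits_pos 10 (a / 10)
      simp only [List.length_append, List.length_cons, List.length_nil] at hlen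
      omega
    · next ha hb =>
      have h2 := List.append_inj h (by
        have := congrArg List.length h
        simp at this
        have p1 := @Nat.length_toDigits_pos 10 (a / 10)
        have p2 := @Nat.length_toDigits_pos 10 (b / 10)
        omega)
      obtain ⟨h3, h4⟩ := h2
      have hd : a / 10 = b / 10 := ih (a / 10) (by omega) (b / 10) h3
      have hm : a % 10 = b % 10 := pv_digitChar_inj _ _ (Nat.mod_lt _ (by norm_num)) (Nat.mod_lt _ (by norm_num)) (by simpa using h4)
      omega

theorem pv_toChars_natCast (a : Nat) : PySem.Int.toChars (a : Int) = Nat.toDigits 10 a := by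
  simp [PySem.Int.toChars]

theorem pv_isdigit_of_isDigit (c : Char) (h : c.isDigit = true) : PySem.Chars.isdigit c = true := by
  simp [PySem.Chars.isdigit, Char.isDigit] at *
  exact h

theorem pv_strIsdigit_toChars (a : Nat) : PySem.Chars.strIsdigit (PySem.Int.toChars (a : Int)) = true := by
  rw [pv_toChars_natCast]
  simp [PySem.Chars.strIsdigit]
  constructor
  · simpa [List.isEmpty_iff, ← List.length_eq_zero_iff] using (@Nat.length_toDigits_pos 10 a).ne'
  · intro c hc
    exact pv_isdigit_of_isDigit c (Nat.isDigit_of_mem_toDigits (by norm_num) (by norm_num) hc)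

theorem pv_toChars_nat_inj (a b : Nat) (h : PySem.Int.toChars (a : Int) = PySem.Int.toChars (b : Int)) : a = b := by
  rw [pv_toChars_natCast, pv_toChars_natCast] at h
  exact pv_toDigits_inj a b h

theorem pv_spacefree_toChars (a : Nat) : ∀ c ∈ PySem.Int.toChars (a : Int), PySem.Chars.isspace c = false := by
  rw [pv_toChars_natCast]
  intro c hc
  have hd := Nat.isDigit_of_mem_toDigits (b := 10) (by norm_num) (by norm_num) hc
  simp only [Char.isDigit, decide_eq_true_eq, Bool.and_eq_true] at hd
  have h1 : 48 ≤ c.toNat := hd.1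
  have h2 : c.toNat ≤ 57 := hd.2
  simp [PySem.Chars.isspace]
  omega

-- ' '.join is injective on nonempty space-free token lists
theorem pv_prefix_space (a : List Char) : ∀ (b l1 l2 : List Char), (' ' ∉ a) → (' ' ∉ b) →
    a ++ ' ' :: l1 = b ++ ' ' :: l2 → a = b ∧ l1 = l2 := by
  induction a with
  | nil =>
    intro b l1 l2 _ hb h
    cases b with
    | nil => simpa using h
    | cons x xs =>
      simp at h
      exact absurd (h.1 ▸ List.mem_cons_self) hb
  | cons x xs ih =>
    intro b l1 l2 ha hb h
    cases b with
    | nil =>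
      simp at h
      exact absurd (h.1 ▸ List.mem_cons_self) ha
    | cons y ys =>
      simp at h
      obtain ⟨hxy, hrest⟩ := h
      subst hxy
      have := ih ys l1 l2 (fun hm => ha (List.mem_cons_of_mem _ hm)) (fun hm => hb (List.mem_cons_of_mem _ hm)) hrest
      simp [this.1, this.2]

theorem pv_join_inj (xs : List (List Char)) : ∀ (ys : List (List Char)),
    (∀ t ∈ xs, t ≠ [] ∧ ' ' ∉ t) → (∀ t ∈ ys, t ≠ [] ∧ ' ' ∉ t) →
    (PySem.Chars.join [' '] xs = PySem.Chars.join [' '] ys ↔ xs = ys) := by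
  induction xs with
  | nil =>
    intro ys _ hys
    constructor
    · intro h
      cases ys with
      | nil => rfl
      | cons t ts =>
        exfalso
        rw [PySem.Chars.join_nil] at h
        cases ts with
        | nil => rw [PySem.Chars.join_singleton] at h; exact (hys t (by simp)).1 h.symm
        | cons u us =>
          rw [PySem.Chars.join_cons_cons] at h
          simp at h
    · intro h; rw [h]
  | cons t ts ih =>
    intro ys hxs hys
    constructor
    · intro h
      cases ys with
      | nil =>
        exfalso
        rw [PySem.Chars.join_nil] at h
        cases ts with
        | nil => rw [PySem.Chars.join_singleton] at h; exact (hxs t (by simp)).1 h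
        | cons u us =>
          rw [PySem.Chars.join_cons_cons] at h
          simp at h
      | cons v vs =>
        cases ts with
        | nil =>
          cases vs with
          | nil =>
            rw [PySem.Chars.join_singleton, PySem.Chars.join_singleton] at h
            rw [h]
          | cons w ws =>
            exfalso
            rw [PySem.Chars.join_singleton, PySem.Chars.join_cons_cons] at h
            have : ' ' ∈ t := by rw [h]; simp
            exact (hxs t (by simp)).2 this
        | cons u us =>
          cases vs with
          | nil =>
            exfalso
            rw [PySem.Chars.join_singleton, PySem.Chars.join_cons_cons] at h
            have : ' ' ∈ v := by rw [← h]; simp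
            exact (hys v (by simp)).2 this
          | cons w ws =>
            rw [PySem.Chars.join_cons_cons, PySem.Chars.join_cons_cons] at h
            simp only [List.append_assoc, List.singleton_append] at h
            have hp := pv_prefix_space t v _ _ (hxs t (by simp)).2 (hys v (by simp)).2 h
            have := (ih (w :: ws) (fun x hx => hxs x (List.mem_cons_of_mem _ hx)) (fun x hx => hys x (List.mem_cons_of_mem _ hx))).mp hp.2
            rw [hp.1, this]
    · intro h; rw [h]

-- A's index_mapping loop builds the first-occurrence rank dictionary
theorem pv_buildA_gen (toks : List (List Char)) : ∀ (d : PySem.Dict Int Int) (c : Int),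
    pvRankDict d → d.keys.Nodup → c = (d.keys.length : Int) →
    pvRankDict (toks.foldl (fun st t =>
      if PySem.Chars.strIsdigit t then
        if st.1.contains (pvToInt t) then st
        else (st.1.insert (pvToInt t) st.2, st.2 + 1)
      else st) (d, c)).1 ∧
    (toks.foldl (fun st t =>
      if PySem.Chars.strIsdigit t then
        if st.1.contains (pvToInt t) then st
        else (st.1.insert (pvToInt t) st.2, st.2 + 1)
      else st) (d, c)).1.keys = PySem.Set.update d.keys (pvNums toks) := by
  induction toks with
  | nil =>
    intro d c h1 h2 h3
    exact ⟨h1, by simp [pvNums, PySem.Set.update_nil]⟩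
  | cons t ts ih =>
    intro d c h1 h2 h3
    by_cases hd : PySem.Chars.strIsdigit t
    · have hnums : pvNums (t :: ts) = pvToInt t :: pvNums ts := by simp [pvNums, hd]
      by_cases hc : d.contains (pvToInt t)
      · have hmem : pvToInt t ∈ d.keys := (PySem.Dict.contains_iff_mem_keys d _).mp hc
        have := ih d c h1 h2 h3
        simp only [List.foldl_cons, hd, if_true, hc, if_true] at *
        rw [hnums, PySem.Set.update_cons, PySem.Set.add_of_mem hmem]
        exact this
      · have hnmem : pvToInt t ∉ d.keys := fun hm => hc ((PySem.Dict.contains_iff_mem_keys d _).mpr hm)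
        have hkeys : (d.insert (pvToInt t) c).keys = d.keys ++ [pvToInt t] :=
          PySem.Dict.keys_insert_of_not_contains d c (by simpa using hc)
        have h1' : pvRankDict (d.insert (pvToInt t) c) := by
          intro v
          rw [PySem.Dict.get?_insert, hkeys]
          by_cases hv : v = pvToInt t
          · subst hv
            rw [if_pos rfl, if_pos (by simp)]
            rw [List.idxOf_append]
            simp [hnmem, h3]
          · rw [if_neg hv, h1 v]
            by_cases hvm : v ∈ d.keys
            · simp [hvm, List.idxOf_append_of_mem hvm]
            · have : v ∉ d.keys ++ [pvToInt t] := by simp [hvm, Ne.symm, hv]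
              simp [hvm, this]
        have h2' : (d.insert (pvToInt t) c).keys.Nodup := by
          rw [hkeys, List.nodup_append]
          refine ⟨h2, List.nodup_singleton _, ?_⟩
          intro x hx b hb
          rw [List.mem_singleton] at hb
          subst hb
          exact fun he => hnmem (he ▸ hx)
        have h3' : c + 1 = ((d.insert (pvToInt t) c).keys.length : Int) := by
          rw [hkeys]; simp [h3]
        have := ih (d.insert (pvToInt t) c) (c + 1) h1' h2' h3'
        simp only [List.foldl_cons, hd, if_true, hc] at *
        rw [hnums, PySem.Set.update_cons, PySem.Set.add_of_not_mem hnmem, ← hkeys]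
        exact this
    · have hnums : pvNums (t :: ts) = pvNums ts := by simp [pvNums, hd]
      have := ih d c h1 h2 h3
      simp only [List.foldl_cons, hd] at *
      rw [hnums]
      exact this
theorem pv_buildA_spec (toks : List (List Char)) :
    pvRankDict (pvBuildA toks).1 ∧ (pvBuildA toks).1.keys = PySem.List.dedup (pvNums toks) := by
  have h := pv_buildA_gen toks PySem.Dict.empty 0
    (by intro v; simp [PySem.Dict.get?_empty, PySem.Dict.keys_empty])
    (by simp [PySem.Dict.keys_empty]) (by simp [PySem.Dict.keys_empty])
  refine ⟨h.1, ?_⟩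
  rw [pvBuildA] at *
  rw [h.2, PySem.Dict.keys_empty]
  simp [PySem.Set.update_nil_left]

theorem pv_canonA_eq (toks : List (List Char)) : pvCanonA toks (pvBuildA toks).1 = pvCanonSpec toks := by
  obtain ⟨hrd, hkeys⟩ := pv_buildA_spec toks
  rw [pvCanonA]
  have hb : (fun (acc : List (List Char)) t =>
      if PySem.Chars.strIsdigit t then acc ++ [PySem.Int.toChars ((pvBuildA toks).1.getD (pvToInt t) 0)]
      else acc ++ [t]) = fun acc t => acc ++ [if PySem.Chars.strIsdigit t then PySem.Int.toChars ((pvBuildA toks).1.getD (pvToInt t) 0) else t] := by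
    funext acc t; split <;> rfl
  rw [hb, PySem.List.foldl_append_singleton_eq_map]
  rw [List.nil_append, pvCanonSpec]
  apply List.map_congr_left
  intro t ht
  by_cases hd : PySem.Chars.strIsdigit t
  · simp only [hd, if_true]
    congr 1
    have hv : pvToInt t ∈ (pvBuildA toks).1.keys := by
      rw [hkeys]
      have : pvToInt t ∈ pvNums toks := by
        rw [pvNums, List.mem_filterMap]
        exact ⟨t, ht, by simp [hd]⟩
      simpa [PySem.List.mem_dedup] using this
    rw [PySem.Dict.getD_eq_get?_getD, hrd (pvToInt t), if_pos hv, hkeys, pvRank]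
    rfl
  · simp [hd]
theorem pv_isspace_space : PySem.Chars.isspace ' ' = true := by decide
theorem pv_canonSpec_tokens (toks : List (List Char))
    (h : ∀ t ∈ toks, t ≠ [] ∧ ∀ c ∈ t, PySem.Chars.isspace c = false) :
    ∀ t ∈ pvCanonSpec toks, t ≠ [] ∧ ' ' ∉ t := by
  intro t ht
  rw [pvCanonSpec, List.mem_map] at ht
  obtain ⟨u, hu, hut⟩ := ht
  by_cases hd : PySem.Chars.strIsdigit u
  · rw [if_pos hd] at hut
    subst hut
    rw [pvRank]
    constructor
    · intro he
      have := pv_strIsdigit_toChars (((PySem.List.dedup (pvNums toks)).idxOf (pvToInt u) : Nat))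
      rw [he] at this
      simp [PySem.Chars.strIsdigit] at this
    · intro hm
      have := pv_spacefree_toChars (((PySem.List.dedup (pvNums toks)).idxOf (pvToInt u) : Nat)) ' ' hm
      rw [pv_isspace_space] at this
      cases this
  · rw [if_neg hd] at hut
    subst hut
    refine ⟨(h u hu).1, fun hm => ?_⟩
    have := (h u hu).2 ' ' hm
    rw [pv_isspace_space] at this
    cases this
theorem pv_A_iff (l r : String) :
    check_equal l r = true ↔
      pvCanonSpec (PySem.Chars.split₀ r.toList) = pvCanonSpec (PySem.Chars.split₀ l.toList) := by
  rw [check_equal]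
  simp only [pv_canonA_eq]
  have hj := pv_join_inj _ _ (pv_canonSpec_tokens _ (pv_split₀_tokens r.toList)) (pv_canonSpec_tokens _ (pv_split₀_tokens l.toList))
  split
  · next hcond => exact iff_of_true rfl (hj.mp hcond)
  · next hcond => exact iff_of_false (by simp) (fun he => hcond (hj.mpr he))

-- B's pass decides Shape and Pattern
theorem pv_getD_cond (d : PySem.Dict Int Int) (i j : Int) :
    d.getD i j = j ↔ (∀ j', d.get? i = some j' → j' = j) := by
  rw [PySem.Dict.getD_eq_get?_getD]
  cases h : d.get? i <;> simp

theorem pv_goB_gen (q : List (List Char × List Char)) : ∀ (l2r r2l : PySem.Dict Int Int),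
    (pvGoB q l2r r2l = true ↔ pvShape q ∧ pvPattern (pvPairs q) ∧ pvCompat l2r r2l (pvPairs q)) := by
  induction q with
  | nil =>
    intro l2r r2l
    simp [pvGoB, pvShape, pvPairs, pvPattern, pvCompat]
  | cons p rest ih =>
    obtain ⟨a, b⟩ := p
    intro l2r r2l
    by_cases hda : PySem.Chars.strIsdigit a <;> by_cases hdb : PySem.Chars.strIsdigit b
    · -- both digits
      set i := pvToInt a with hi
      set j := pvToInt b with hj
      have hpairs : pvPairs ((a, b) :: rest) = (i, j) :: pvPairs rest := by
        simp [pvPairs, hda, hdb]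
        exact ⟨rfl, rfl⟩
      by_cases hcond : l2r.getD i j = j ∧ r2l.getD j i = i
      · have hgo : pvGoB ((a, b) :: rest) l2r r2l = pvGoB rest (l2r.insert i j) (r2l.insert j i) := by
          simp only [pvGoB, hda, hdb]
          rw [← hi, ← hj]
          simp [hcond.1, hcond.2]
        rw [hgo, ih, hpairs]
        have hl := (pv_getD_cond l2r i j).mp hcond.1
        have hr := (pv_getD_cond r2l j i).mp hcond.2
        constructor
        · rintro ⟨hsh, hpat, hcomp⟩
          have hpat' : pvPattern ((i, j) :: pvPairs rest) := by
            intro x hx y hy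
            rcases List.mem_cons.mp hx with rfl | hx <;> rcases List.mem_cons.mp hy with rfl | hy
            · simp
            · constructor
              · intro he
                exact (hcomp y hy).1 j (by rw [← he] at *; exact PySem.Dict.get?_insert_self _ _ _)
              · intro he
                exact (hcomp y hy).2 i (by rw [← he] at *; exact PySem.Dict.get?_insert_self _ _ _)
            · constructor
              · intro he
                exact ((hcomp x hx).1 j (by rw [he] at *; exact PySem.Dict.get?_insert_self _ _ _)).symm
              · intro he
                exact ((hcomp x hx).2 i (by rw [he] at *; exact PySem.Dict.get?_insert_self _ _ _)).symm
            · exact hpat x hx y hy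
          refine ⟨?_, hpat', ?_⟩
          · intro x hx
            rcases List.mem_cons.mp hx with rfl | hx
            · exact ⟨by simp [hda, hdb], by simp [hda]⟩
            · exact hsh x hx
          · intro x hx
            rcases List.mem_cons.mp hx with rfl | hx
            · exact ⟨hl, hr⟩
            · refine ⟨?_, ?_⟩
              · intro j' hj'
                by_cases hxi : x.1 = i
                · have hxj : x.2 = j := ((hpat' (i, j) (by simp) x (by simp [hx])).mp hxi.symm).symm
                  rw [hxi] at hj'
                  rw [hl j' hj', hxj]
                · exact (hcomp x hx).1 j' (by rw [PySem.Dict.get?_insert] at *; simp [hxi] at *; exact hj')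
              · intro i' hi'
                by_cases hxj : x.2 = j
                · have hxi : x.1 = i := ((hpat' (i, j) (by simp) x (by simp [hx])).mpr hxj.symm).symm
                  rw [hxj] at hi'
                  rw [hr i' hi', hxi]
                · exact (hcomp x hx).2 i' (by rw [PySem.Dict.get?_insert] at *; simp [hxj] at *; exact hi')
        · rintro ⟨hsh, hpat, hcomp⟩
          refine ⟨fun x hx => hsh x (List.mem_cons_of_mem _ hx), ?_, ?_⟩
          · intro x hx y hy
            exact hpat x (List.mem_cons_of_mem _ hx) y (List.mem_cons_of_mem _ hy)
          · intro x hx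
            refine ⟨?_, ?_⟩
            · intro j' hj'
              rw [PySem.Dict.get?_insert] at hj'
              by_cases hxi : x.1 = i
              · rw [if_pos hxi] at hj'
                have : j' = j := by injection hj'.symm
                subst this
                exact (hpat (i, j) (by simp) x (by simp [hx])).mp hxi.symm
              · rw [if_neg hxi] at hj'
                exact (hcomp x (List.mem_cons_of_mem _ hx)).1 j' hj'
            · intro i' hi'
              rw [PySem.Dict.get?_insert] at hi'
              by_cases hxj : x.2 = j
              · rw [if_pos hxj] at hi'
                have : i' = i := by injection hi'.symm
                subst this
                exact (hpat (i, j) (by simp) x (by simp [hx])).mpr hxj.symm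
              · rw [if_neg hxj] at hi'
                exact (hcomp x (List.mem_cons_of_mem _ hx)).2 i' hi'
      · have hgo : pvGoB ((a, b) :: rest) l2r r2l = false := by
          simp only [pvGoB, hda, hdb]
          rw [← hi, ← hj]
          simp only [Bool.true_and, if_true]
          split
          · next h => exact absurd h hcond
          · rfl
        rw [hgo, hpairs]
        constructor
        · intro h; cases h
        · rintro ⟨hsh, hpat, hcomp⟩
          exfalso
          apply hcond
          have := hcomp (i, j) (by simp)
          exact ⟨(pv_getD_cond l2r i j).mpr this.1, (pv_getD_cond r2l j i).mpr this.2⟩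
    · -- digit / non-digit
      have hgo : pvGoB ((a, b) :: rest) l2r r2l = false := by
        simp [pvGoB, hda, hdb]
      rw [hgo]
      constructor
      · intro h; cases h
      · rintro ⟨hsh, _, _⟩
        have := (hsh (a, b) (by simp)).1
        simp [hda, hdb] at this
    · -- non-digit / digit
      have hgo : pvGoB ((a, b) :: rest) l2r r2l = false := by
        simp [pvGoB, hda, hdb]
      rw [hgo]
      constructor
      · intro h; cases h
      · rintro ⟨hsh, _, _⟩
        have := (hsh (a, b) (by simp)).1
        simp [hda, hdb] at this
    · -- neither digit
      have hpairs : pvPairs ((a, b) :: rest) = pvPairs rest := by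
        simp [pvPairs, hda]
      by_cases hab : a = b
      · have hgo : pvGoB ((a, b) :: rest) l2r r2l = pvGoB rest l2r r2l := by
          simp [pvGoB, hdb, hab]
        rw [hgo, ih, hpairs]
        constructor
        · rintro ⟨hsh, hpat, hcomp⟩
          refine ⟨?_, hpat, hcomp⟩
          intro x hx
          rcases List.mem_cons.mp hx with rfl | hx
          · simp only at *
            exact ⟨by rw [hab], fun _ => hab⟩
          · exact hsh x hx
        · rintro ⟨hsh, hpat, hcomp⟩
          exact ⟨fun x hx => hsh x (List.mem_cons_of_mem _ hx), hpat, hcomp⟩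
      · have hgo : pvGoB ((a, b) :: rest) l2r r2l = false := by
          simp [pvGoB, hdb, hab]
        rw [hgo]
        constructor
        · intro h; cases h
        · rintro ⟨hsh, _, _⟩
          exact absurd ((hsh (a, b) (by simp)).2 (by simp [hda])) hab
theorem pv_B_iff (l r : String) :
    check_equal_alt l r = true ↔
      (PySem.Chars.split₀ l.toList).length = (PySem.Chars.split₀ r.toList).length ∧
      pvShape ((PySem.Chars.split₀ l.toList).zip (PySem.Chars.split₀ r.toList)) ∧
      pvPattern (pvPairs ((PySem.Chars.split₀ l.toList).zip (PySem.Chars.split₀ r.toList))) := by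
  rw [check_equal_alt]
  split
  · next hne =>
    simp only [Bool.false_eq_true, false_iff]
    rintro ⟨hlen, _, _⟩
    exact hne hlen
  · next hne =>
    rw [not_not] at hne
    rw [pv_goB_gen]
    have hcompat : pvCompat PySem.Dict.empty PySem.Dict.empty (pvPairs ((PySem.Chars.split₀ l.toList).zip (PySem.Chars.split₀ r.toList))) := by
      intro x _
      constructor <;> intro y hy <;> rw [PySem.Dict.get?_empty] at hy <;> cases hy
    constructor
    · rintro ⟨hsh, hpat, _⟩
      exact ⟨hne, hsh, hpat⟩
    · rintro ⟨_, hsh, hpat⟩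
      exact ⟨hsh, hpat, hcompat⟩

-- ranks versus the bijection pattern
theorem pv_dedup_map_inj {α β : Type} [BEq α] [LawfulBEq α] [BEq β] [LawfulBEq β] (f : α → β) (l : List α)
    (hinj : ∀ a ∈ l, ∀ b ∈ l, f a = f b → a = b) :
    PySem.List.dedup (l.map f) = (PySem.List.dedup l).map f := by
  induction l using List.reverseRecOn with
  | nil => simp
  | append_singleton xs x ih =>
    rw [List.map_append, List.map_singleton]
    simp only [PySem.List.dedup_eq_ofList] at *
    rw [PySem.Set.ofList_append_singleton, PySem.Set.ofList_append_singleton]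
    rw [ih (fun a ha b hb h => hinj a (List.mem_append_left _ ha) b (List.mem_append_left _ hb) h)]
    by_cases hx : x ∈ PySem.Set.ofList xs
    · rw [PySem.Set.add_of_mem hx, PySem.Set.add_of_mem (List.mem_map_of_mem hx)]
    · rw [PySem.Set.add_of_not_mem hx, PySem.Set.add_of_not_mem ?_, List.map_append, List.map_singleton]
      intro hm
      rw [List.mem_map] at hm
      obtain ⟨a, ha, hfa⟩ := hm
      have haxs : a ∈ xs := (PySem.Set.mem_ofList _ _).mp ha
      have := hinj a (List.mem_append_left _ haxs) x (List.mem_append_right _ (by simp)) hfa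
      exact hx (this ▸ ha)

theorem pv_idxOf_map {α β : Type} [BEq α] [LawfulBEq α] [BEq β] [LawfulBEq β] (f : α → β) (l : List α) (x : α)
    (hinj : ∀ a ∈ l, f a = f x → a = x) :
    List.idxOf (f x) (l.map f) = List.idxOf x l := by
  induction l with
  | nil => simp
  | cons a l ih =>
    rw [List.map_cons]
    by_cases hax : a = x
    · subst hax; simp
    · have hf : f a ≠ f x := fun h => hax (hinj a List.mem_cons_self h)
      rw [List.idxOf_cons_ne _ (by simpa using hf), List.idxOf_cons_ne _ (by simpa using hax)]
      rw [ih (fun b hb h => hinj b (List.mem_cons_of_mem _ hb) h)]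

theorem pv_rank_of_pattern (P : List (Int × Int)) (hP : pvPattern P) :
    ∀ p ∈ P, pvRank p.1 (P.map Prod.fst) = pvRank p.2 (P.map Prod.snd) := by
  intro p hp
  have hfst : PySem.List.dedup (P.map Prod.fst) = (PySem.List.dedup P).map Prod.fst :=
    pv_dedup_map_inj _ P (fun a ha b hb h => Prod.ext h ((hP a ha b hb).mp h))
  have hsnd : PySem.List.dedup (P.map Prod.snd) = (PySem.List.dedup P).map Prod.snd :=
    pv_dedup_map_inj _ P (fun a ha b hb h => Prod.ext ((hP a ha b hb).mpr h) h)
  rw [pvRank, pvRank, hfst, hsnd]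
  rw [pv_idxOf_map _ _ _ (fun a ha h => ?hf), pv_idxOf_map _ _ _ (fun a ha h => ?hs)]
  case hf =>
    have haP : a ∈ P := by
      rw [PySem.List.dedup_eq_ofList] at ha
      exact (PySem.Set.mem_ofList _ _).mp ha
    exact Prod.ext h ((hP a haP p hp).mp h)
  case hs =>
    have haP : a ∈ P := by
      rw [PySem.List.dedup_eq_ofList] at ha
      exact (PySem.Set.mem_ofList _ _).mp ha
    exact Prod.ext ((hP a haP p hp).mpr h) h

theorem pv_rank_inj (v w : Int) (xs : List Int) (hv : v ∈ xs) (_hw : w ∈ xs) :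
    (pvRank v xs = pvRank w xs ↔ v = w) := by
  rw [pvRank, pvRank, Int.natCast_inj]
  have hv' : v ∈ PySem.List.dedup xs := by
    rw [PySem.List.dedup_eq_ofList]; exact (PySem.Set.mem_ofList _ _).mpr hv
  exact List.idxOf_inj hv'

theorem pv_pairs_maps (lt : List (List Char)) : ∀ (rt : List (List Char)),
    lt.length = rt.length → pvShape (lt.zip rt) →
    (pvPairs (lt.zip rt)).map Prod.fst = pvNums lt ∧ (pvPairs (lt.zip rt)).map Prod.snd = pvNums rt := by
  induction lt with
  | nil =>
    intro rt hlen _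
    have : rt = [] := by cases rt <;> simp_all
    subst this
    simp [pvPairs, pvNums]
  | cons a lt ih =>
    intro rt hlen hsh
    cases rt with
    | nil => simp at hlen
    | cons b rt =>
      have hlen' : lt.length = rt.length := by simpa using hlen
      have hsh' : pvShape (lt.zip rt) := fun p hp => hsh p (by simp [hp])
      have hflag := (hsh (a, b) (by simp)).1
      obtain ⟨ih1, ih2⟩ := ih rt hlen' hsh'
      by_cases hda : PySem.Chars.strIsdigit a
      · have hdb : PySem.Chars.strIsdigit b := hflag ▸ hda
        constructor
        · simp only [pvPairs, pvNums] at ih1 ⊢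
          simp [hda, hdb]
          convert ih1 using 2
          simp
        · simp only [pvPairs, pvNums] at ih2 ⊢
          simp [hda, hdb]
          convert ih2 using 2
          simp
      · have hdb : ¬ PySem.Chars.strIsdigit b := fun h => hda (hflag ▸ h)
        constructor
        · simp only [pvPairs, pvNums] at ih1 ⊢
          simp [hda, hdb]
          convert ih1 using 2
          simp
        · simp only [pvPairs, pvNums] at ih2 ⊢
          simp [hda, hdb]
          convert ih2 using 2
          simp
theorem pv_mem_nums (toks : List (List Char)) (t : List Char) (ht : t ∈ toks)
    (hd : PySem.Chars.strIsdigit t) : pvToInt t ∈ pvNums toks := by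
  rw [pvNums, List.mem_filterMap]
  exact ⟨t, ht, by simp [hd]⟩

theorem pv_main (lt rt : List (List Char)) :
    (pvCanonSpec rt = pvCanonSpec lt) ↔
      (lt.length = rt.length ∧ pvShape (lt.zip rt) ∧ pvPattern (pvPairs (lt.zip rt))) := by
  constructor
  · intro h
    have hlen : lt.length = rt.length := by
      have := congrArg List.length h
      simpa [pvCanonSpec] using this.symm
    -- pointwise equality of the canonical token lists
    have hpt : ∀ (k : Nat) (hk : k < lt.length),
        (if PySem.Chars.strIsdigit (rt[k]'(hlen ▸ hk)) then PySem.Int.toChars (pvRank (pvToInt (rt[k]'(hlen ▸ hk))) (pvNums rt)) else rt[k]'(hlen ▸ hk)) =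
        (if PySem.Chars.strIsdigit (lt[k]'hk) then PySem.Int.toChars (pvRank (pvToInt (lt[k]'hk)) (pvNums lt)) else lt[k]'hk) := by
      intro k hk
      have hp2 : (pvCanonSpec rt)[k]'(by simp [pvCanonSpec]; omega) =
          (pvCanonSpec lt)[k]'(by simp [pvCanonSpec]; omega) := by simp only [h]
      simpa only [pvCanonSpec, List.getElem_map] using hp2
    -- flags agree position-wise
    have hflag : ∀ (k : Nat) (hk : k < lt.length),
        PySem.Chars.strIsdigit (lt[k]'hk) = PySem.Chars.strIsdigit (rt[k]'(hlen ▸ hk)) := by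
      intro k hk
      have hp := hpt k hk
      by_cases hdl : PySem.Chars.strIsdigit (lt[k]'hk) <;> by_cases hdr : PySem.Chars.strIsdigit (rt[k]'(hlen ▸ hk))
      · rw [hdl, hdr]
      · rw [if_pos hdl, if_neg hdr] at hp
        have : PySem.Chars.strIsdigit (rt[k]'(hlen ▸ hk)) = true := by
          rw [hp, pvRank]
          exact pv_strIsdigit_toChars _
        exact absurd this hdr
      · rw [if_neg hdl, if_pos hdr] at hp
        have : PySem.Chars.strIsdigit (lt[k]'hk) = true := by
          rw [← hp, pvRank]
          exact pv_strIsdigit_toChars _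
        exact absurd this hdl
      · simp [hdl, hdr] at *
    -- equal ranks at digit positions
    have hrank : ∀ (k : Nat) (hk : k < lt.length), PySem.Chars.strIsdigit (lt[k]'hk) →
        pvRank (pvToInt (lt[k]'hk)) (pvNums lt) = pvRank (pvToInt (rt[k]'(hlen ▸ hk))) (pvNums rt) := by
      intro k hk hdl
      have hdr : PySem.Chars.strIsdigit (rt[k]'(hlen ▸ hk)) := (hflag k hk) ▸ hdl
      have hp := hpt k hk
      rw [if_pos hdl, if_pos hdr] at hp
      rw [pvRank, pvRank] at hp ⊢
      exact congrArg _ (pv_toChars_nat_inj _ _ hp.symm)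
    -- membership in the zip is positional
    have hmemzip : ∀ p ∈ lt.zip rt, ∃ (k : Nat) (hk : k < lt.length),
        p.1 = lt[k]'hk ∧ p.2 = rt[k]'(hlen ▸ hk) := by
      intro p hp
      rw [List.mem_iff_getElem] at hp
      obtain ⟨k, hk, he⟩ := hp
      have hk' : k < lt.length := by simp [List.length_zip] at hk; omega
      refine ⟨k, hk', ?_, ?_⟩
      · rw [← he, List.getElem_zip]
      · rw [← he, List.getElem_zip]
    refine ⟨hlen, ?_, ?_⟩
    · intro p hp
      obtain ⟨k, hk, h1, h2⟩ := hmemzip p hp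
      rw [h1, h2]
      refine ⟨hflag k hk, fun hnd => ?_⟩
      have hp := hpt k hk
      rw [if_neg (by rw [← hflag k hk, hnd]; simp), if_neg (by simp [hnd])] at hp
      exact hp.symm
    · intro x hx y hy
      rw [pvPairs, List.mem_filterMap] at hx hy
      obtain ⟨p, hp, hpe⟩ := hx
      obtain ⟨q, hq, hqe⟩ := hy
      obtain ⟨k, hk, hp1, hp2⟩ := hmemzip p hp
      obtain ⟨k', hk', hq1, hq2⟩ := hmemzip q hq
      have hpd : PySem.Chars.strIsdigit p.1 ∧ PySem.Chars.strIsdigit p.2 := by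
        by_contra hc
        rw [if_neg (by simpa [Bool.and_eq_true] using hc)] at hpe
        cases hpe
      have hqd : PySem.Chars.strIsdigit q.1 ∧ PySem.Chars.strIsdigit q.2 := by
        by_contra hc
        rw [if_neg (by simpa [Bool.and_eq_true] using hc)] at hqe
        cases hqe
      rw [if_pos (by simp [hpd.1, hpd.2])] at hpe
      rw [if_pos (by simp [hqd.1, hqd.2])] at hqe
      cases hpe; cases hqe
      simp only
      rw [hp1, hp2, hq1, hq2]
      have hdl : PySem.Chars.strIsdigit (lt[k]'hk) := hp1 ▸ hpd.1
      have hdl' : PySem.Chars.strIsdigit (lt[k']'hk') := hq1 ▸ hqd.1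
      have hdr : PySem.Chars.strIsdigit (rt[k]'(hlen ▸ hk)) := hp2 ▸ hpd.2
      have hdr' : PySem.Chars.strIsdigit (rt[k']'(hlen ▸ hk')) := hq2 ▸ hqd.2
      have m1 : pvToInt (lt[k]'hk) ∈ pvNums lt := pv_mem_nums lt _ (List.getElem_mem hk) hdl
      have m1' : pvToInt (lt[k']'hk') ∈ pvNums lt := pv_mem_nums lt _ (List.getElem_mem hk') hdl'
      have m2 : pvToInt (rt[k]'(hlen ▸ hk)) ∈ pvNums rt := pv_mem_nums rt _ (List.getElem_mem _) hdr
      have m2' : pvToInt (rt[k']'(hlen ▸ hk')) ∈ pvNums rt := pv_mem_nums rt _ (List.getElem_mem _) hdr'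
      rw [← pv_rank_inj _ _ _ m1 m1', ← pv_rank_inj _ _ _ m2 m2',
        hrank k hk hdl, hrank k' hk' hdl']
  · rintro ⟨hlen, hsh, hpat⟩
    apply List.ext_getElem
    · simp [pvCanonSpec, hlen]
    · intro k hk1 hk2
      have hkr : k < rt.length := by simpa [pvCanonSpec] using hk1
      have hkl : k < lt.length := by omega
      simp only [pvCanonSpec, List.getElem_map]
      have hmem : (lt[k]'hkl, rt[k]'hkr) ∈ lt.zip rt := by
        rw [List.mem_iff_getElem]
        exact ⟨k, by simp [List.length_zip]; omega, by rw [List.getElem_zip]⟩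
      have hfl := hsh _ hmem
      by_cases hd : PySem.Chars.strIsdigit (lt[k]'hkl)
      · have hdr : PySem.Chars.strIsdigit (rt[k]'hkr) := by
          have := hfl.1
          simp only at this
          rw [← this]; exact hd
        rw [if_pos hd, if_pos hdr]
        congr 1
        have hpP : (pvToInt (lt[k]'hkl), pvToInt (rt[k]'hkr)) ∈ pvPairs (lt.zip rt) := by
          rw [pvPairs, List.mem_filterMap]
          exact ⟨(lt[k]'hkl, rt[k]'hkr), hmem, by simp [hd, hdr]⟩
        have hmaps := pv_pairs_maps lt rt hlen hsh
        have hr := pv_rank_of_pattern _ hpat _ hpP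
        rw [hmaps.1, hmaps.2] at hr
        exact hr.symm
      · have hdr : ¬ PySem.Chars.strIsdigit (rt[k]'hkr) := by
          have := hfl.1
          simp only at this
          rw [← this]; exact hd
        rw [if_neg hd, if_neg hdr]
        have := hfl.2 (by simpa using hd)
        simp only at this
        exact this.symm

-- ===== VERDICT (by name: the statement is the Claim_ definition above) =====
theorem check_equal_spec : Claim_equal_check_equal := by
  intro l r _hdom
  show check_equal l r = check_equal_alt l r
  apply Bool.eq_iff_iff.mpr
  rw [pv_A_iff, pv_B_iff]
  exact pv_main (PySem.Chars.split₀ l.toList) (PySem.Chars.split₀ r.toList)
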